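-- pv_equiv track=rewrite | github.com/sunlabuiuc/PyHealth | examples/tcga_rnaseq_cancer_classification_bulkrnabert.py | _per_class_counts
-- ===== SOURCE A (Python) =====
-- from typing import Dict, Iterable, List, Optional, Sequence, Tuple
--
-- def _per_class_counts(
--     y_true: Sequence[int], y_pred: Sequence[int]
-- ) -> Dict[int, Tuple[int, int, int, int]]:
--     labels = sorted(set(y_true) | set(y_pred))
--     counts: Dict[int, Tuple[int, int, int, int]] = {}
--     for label in labels:
--         tp = sum(1 for t, p in zip(y_true, y_pred) if t == label and p == label)
--         fp = sum(1 for t, p in zip(y_true, y_pred) if t != label and p == label)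
--         fn = sum(1 for t, p in zip(y_true, y_pred) if t == label and p != label)
--         support = sum(1 for t in y_true if t == label)
--         counts[label] = (tp, fp, fn, support)
--     return counts
-- ===== SOURCE B (Python) =====
-- from typing import Dict, Iterable, List, Optional, Sequence, Tuple
--
-- def _count(xs) -> Dict[int, int]:
--     c: Dict[int, int] = {}
--     for x in xs:
--         c[x] = c.get(x, 0) + 1
--     return c
--
-- def _per_class_counts(
--     y_true: Sequence[int], y_pred: Sequence[int]
-- ) -> Dict[int, Tuple[int, int, int, int]]:
--     pairs = list(zip(y_true, y_pred))
--     tp = _count(t for t, p in pairs if t == p)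
--     fp = _count(p for t, p in pairs if t != p)
--     fn = _count(t for t, p in pairs if t != p)
--     support = _count(y_true)
--     labels = sorted(set(y_true) | set(y_pred))
--     return {
--         l: (tp.get(l, 0), fp.get(l, 0), fn.get(l, 0), support.get(l, 0))
--         for l in labels
--     }
-- ===== Notes on version B (the rewrite author's own statement) =====
-- stated objective: faster
-- what changed: A rescans the whole zip(y_true, y_pred) four times for every label (O(L*n)); B builds tp/fp/fn/support count dicts in a single pass over the pairs plus one over y_true and then does O(1) lookups per sorted label.
import Mathlib
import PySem

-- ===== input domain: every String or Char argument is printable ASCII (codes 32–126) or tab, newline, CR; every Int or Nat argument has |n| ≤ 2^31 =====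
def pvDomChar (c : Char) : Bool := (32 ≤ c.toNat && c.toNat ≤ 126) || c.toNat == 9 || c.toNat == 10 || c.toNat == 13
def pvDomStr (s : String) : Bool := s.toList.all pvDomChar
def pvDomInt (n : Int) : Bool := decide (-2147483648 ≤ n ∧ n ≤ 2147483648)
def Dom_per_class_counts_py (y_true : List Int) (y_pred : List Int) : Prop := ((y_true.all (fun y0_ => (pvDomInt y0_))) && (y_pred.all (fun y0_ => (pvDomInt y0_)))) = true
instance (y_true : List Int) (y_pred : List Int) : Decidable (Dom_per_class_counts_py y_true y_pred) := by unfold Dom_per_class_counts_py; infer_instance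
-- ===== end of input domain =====

-- B replaces A's four full scans of zip(y_true, y_pred) per label with count dicts built in
-- one pass over the pairs plus one over y_true, then O(1) lookups per label (objective: faster).


-- ===== PORT A =====
-- labels = sorted(set(y_true) | set(y_pred)); per label, four generator-sums over zip / y_true;
-- the result dict (distinct keys, inserted in label order) is the association list built by appending.
def per_class_counts_py (y_true : List Int) (y_pred : List Int) : List (Int × Int × Int × Int × Int) :=
  let labels := PySem.List.sorted (PySem.Set.ofList (y_true ++ y_pred)) (fun x => x) false
  labels.foldl (fun counts label =>
    let tp := (y_true.zip y_pred).foldl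
      (fun acc q => if q.1 == label && q.2 == label then acc + 1 else acc) (0 : Int)
    let fp := (y_true.zip y_pred).foldl
      (fun acc q => if !(q.1 == label) && q.2 == label then acc + 1 else acc) (0 : Int)
    let fn := (y_true.zip y_pred).foldl
      (fun acc q => if q.1 == label && !(q.2 == label) then acc + 1 else acc) (0 : Int)
    let support := y_true.foldl (fun acc t => if t == label then acc + 1 else acc) (0 : Int)
    counts ++ [(label, tp, fp, fn, support)]) []

-- ===== PORT B =====
-- _count: a dict mapping each element to its multiplicity (c[x] = c.get(x, 0) + 1 loop)
def pvCount (xs : List Int) : PySem.Dict Int Int :=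
  xs.foldl (fun d x => d.insert x (d.getD x 0 + 1)) PySem.Dict.empty

def per_class_counts_py_alt (y_true : List Int) (y_pred : List Int) : List (Int × Int × Int × Int × Int) :=
  let pairs := y_true.zip y_pred
  let tp := pvCount ((pairs.filter (fun q => q.1 == q.2)).map (fun q => q.1))
  let fp := pvCount ((pairs.filter (fun q => q.1 != q.2)).map (fun q => q.2))
  let fn := pvCount ((pairs.filter (fun q => q.1 != q.2)).map (fun q => q.1))
  let support := pvCount y_true
  let labels := PySem.List.sorted (PySem.Set.ofList (y_true ++ y_pred)) (fun x => x) false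
  labels.map (fun l => (l, tp.getD l 0, fp.getD l 0, fn.getD l 0, support.getD l 0))

-- ===== PRECONDITION & SPEC =====
def Spec_per_class_counts_py (y_true : List Int) (y_pred : List Int) (out : List (Int × Int × Int × Int × Int)) : Prop := out = per_class_counts_py_alt y_true y_pred
instance (y_true : List Int) (y_pred : List Int) (out : List (Int × Int × Int × Int × Int)) : Decidable (Spec_per_class_counts_py y_true y_pred out) := by unfold Spec_per_class_counts_py; infer_instance

-- ===== CLAIM (what is proved, stated in full; the proofs are below) =====
def Claim_equal_per_class_counts_py : Prop := ∀ (y_true : List Int) (y_pred : List Int), Dom_per_class_counts_py y_true y_pred → Spec_per_class_counts_py y_true y_pred (per_class_counts_py y_true y_pred)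

-- ===== LEMMAS AND PROOFS =====

-- a _count dict looked up with default 0 is the multiplicity
theorem pvCount_getD (xs : List Int) (l : Int) : (pvCount xs).getD l 0 = xs.count l := by
  rw [pvCount, PySem.Dict.foldl_insert_getD_add_one_eq_counter, PySem.Dict.getD_counter]

theorem per_class_counts_py_spec' (y_true y_pred : List Int) :
    per_class_counts_py y_true y_pred = per_class_counts_py_alt y_true y_pred := by
  simp only [per_class_counts_py, per_class_counts_py_alt,
    PySem.List.foldl_append_singleton_eq_map, List.nil_append]
  congr 1
  funext l
  simp only [PySem.List.foldl_count_if, zero_add, pvCount_getD, List.count,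
    List.countP_map, List.countP_filter]
  refine Prod.ext rfl (Prod.ext ?_ (Prod.ext ?_ (Prod.ext ?_ rfl))) <;>
  · dsimp only
    congr 1
    apply List.countP_congr
    intro q _
    by_cases h1 : q.1 = l <;> by_cases h2 : q.2 = l <;> by_cases h3 : q.1 = q.2 <;> simp_all

-- ===== VERDICT (by name: the statement is the Claim_ definition above) =====
theorem per_class_counts_py_spec : Claim_equal_per_class_counts_py := by
  intro y_true y_pred _
  exact per_class_counts_py_spec' y_true y_pred
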